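-- pv_equiv track=rewrite | github.com/mrveiss/AutoBot-AI | autobot-user-backend/agents/interactive_terminal_agent.py | _detect_input_prompt
-- ===== SOURCE A (Python) =====
-- def _detect_input_prompt(output: str) -> bool:
--     """Detect interactive prompts"""
--     prompt_patterns = [
--         "(y/N)",
--         "(Y/n)",
--         "[y/N]",
--         "[Y/n]",
--         "Continue?",
--         "Proceed?",
--         "Are you sure",
--         "Do you want to continue",
--     ]
--     return any(pattern in output for pattern in prompt_patterns)
-- ===== SOURCE B (Python) =====
-- def _detect_input_prompt(output: str) -> bool:
--     """Detect interactive prompts (single left-to-right scan over positions)."""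
--     prompt_patterns = [
--         "(y/N)",
--         "(Y/n)",
--         "[y/N]",
--         "[Y/n]",
--         "Continue?",
--         "Proceed?",
--         "Are you sure",
--         "Do you want to continue",
--     ]
--     for i in range(len(output) + 1):
--         if any(output.startswith(p, i) for p in prompt_patterns):
--             return True
--     return False
-- ===== Notes on version B (the rewrite author's own statement) =====
-- stated objective: alternative
-- what changed: Replaces eight independent whole-string substring scans (one per pattern) with a single left-to-right pass over positions that tests every pattern as a prefix at each position, alternation-style.
import Mathlib
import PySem

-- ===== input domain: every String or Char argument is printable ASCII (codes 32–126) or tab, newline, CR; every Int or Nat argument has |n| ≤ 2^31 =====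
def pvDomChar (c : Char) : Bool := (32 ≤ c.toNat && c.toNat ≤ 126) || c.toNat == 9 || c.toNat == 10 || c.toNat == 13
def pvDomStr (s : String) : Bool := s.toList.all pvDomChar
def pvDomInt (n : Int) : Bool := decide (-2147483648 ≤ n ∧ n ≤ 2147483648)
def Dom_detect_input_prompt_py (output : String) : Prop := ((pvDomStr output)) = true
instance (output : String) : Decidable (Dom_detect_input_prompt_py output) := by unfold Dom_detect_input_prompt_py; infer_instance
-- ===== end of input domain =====

-- B replaces eight independent substring scans with one left-to-right pass testing
-- all patterns as prefixes at each position (alternative decomposition, same cost).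

-- ===== PORT A =====
def detect_input_prompt_py (output : String) : Bool :=
  ["(y/N)", "(Y/n)", "[y/N]", "[Y/n]", "Continue?", "Proceed?",
   "Are you sure", "Do you want to continue"].any
    (fun pattern => PySem.Str.isIn pattern output)

-- ===== PORT B =====
-- the same eight patterns, as character lists (B scans char by char)
def pvPrompts : List (List Char) :=
  ["(y/N)".toList, "(Y/n)".toList, "[y/N]".toList, "[Y/n]".toList,
   "Continue?".toList, "Proceed?".toList,
   "Are you sure".toList, "Do you want to continue".toList]

-- one pass over the positions of the text: at each position try every pattern as a prefix
-- (B's loop 'for i in range(len(output)+1): if any(output.startswith(p, i) ...)')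
def pvScan (pats : List (List Char)) : List Char → Bool
  | [] => pats.any (fun p => p.isPrefixOf ([] : List Char))
  | c :: rest => pats.any (fun p => p.isPrefixOf (c :: rest)) || pvScan pats rest

def detect_input_prompt_py_alt (output : String) : Bool :=
  pvScan pvPrompts output.toList

-- ===== PRECONDITION & SPEC =====
def Spec_detect_input_prompt_py (output : String) (out : Bool) : Prop := out = detect_input_prompt_py_alt output
instance (output : String) (out : Bool) : Decidable (Spec_detect_input_prompt_py output out) := by unfold Spec_detect_input_prompt_py; infer_instance

-- ===== CLAIM (what is proved, stated in full; the proofs are below) =====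
def Claim_equal_detect_input_prompt_py : Prop := ∀ (output : String), Dom_detect_input_prompt_py output → Spec_detect_input_prompt_py output (detect_input_prompt_py output)

-- ===== LEMMAS AND PROOFS =====

-- the position scan finds exactly the patterns that occur as an infix
lemma pvScan_iff (pats : List (List Char)) (l : List Char) :
    pvScan pats l = true ↔ ∃ p ∈ pats, p <:+: l := by
  induction l with
  | nil =>
      simp [pvScan, List.any_eq_true, List.isPrefixOf_iff_prefix]
  | cons c rest ih =>
      simp only [pvScan, Bool.or_eq_true, List.any_eq_true,
        List.isPrefixOf_iff_prefix, ih, List.infix_cons_iff]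
      constructor
      · rintro (⟨p, hp, h⟩ | ⟨p, hp, h⟩)
        · exact ⟨p, hp, Or.inl h⟩
        · exact ⟨p, hp, Or.inr h⟩
      · rintro ⟨p, hp, h | h⟩
        · exact Or.inl ⟨p, hp, h⟩
        · exact Or.inr ⟨p, hp, h⟩

-- ===== VERDICT (by name: the statement is the Claim_ definition above) =====
theorem detect_input_prompt_py_spec : Claim_equal_detect_input_prompt_py := by
  intro output _
  unfold Spec_detect_input_prompt_py
  have hA : detect_input_prompt_py output = true ↔
      ∃ p ∈ pvPrompts, p <:+: output.toList := by
    simp [detect_input_prompt_py, pvPrompts, PySem.Chars.isIn_iff_infix]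
  have hB : detect_input_prompt_py_alt output = true ↔
      ∃ p ∈ pvPrompts, p <:+: output.toList := by
    simpa [detect_input_prompt_py_alt] using pvScan_iff pvPrompts output.toList
  rw [Bool.eq_iff_iff, hA, hB]
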